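-- pv_equiv track=rewrite | github.com/Kawser-nerd/CLCDSA | Source Codes/CodeJamData/08/42/7.py | enumerations
-- ===== SOURCE A (Python) =====
-- from copy import copy
--
-- def enumerations(elements, length):
--     def generate_enums():
--         if len(enum) == length:
--             enums.append(copy(enum))
--         else:
--             for elm in elements:
--                 enum.append(elm)
--                 generate_enums()
--                 enum.pop()
--     enums = []
--     enum = []
--     generate_enums()
--     return enums
-- ===== SOURCE B (Python) =====
-- def enumerations(elements, length):
--     result = [[]]
--     for _ in range(length):
--         result = [prefix + [e] for prefix in result for e in elements]
--     return result
-- ===== Notes on version B (the rewrite author's own statement) =====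
-- stated objective: simpler
-- what changed: Replaces the recursive backtracking generator over a shared mutable buffer with an iterative breadth-first construction: start from [[]] and extend every partial sequence by each element, length times.
-- outside the precondition, e.g. on enumerations([], -1): A returns [], B returns [[]]
import Mathlib
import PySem

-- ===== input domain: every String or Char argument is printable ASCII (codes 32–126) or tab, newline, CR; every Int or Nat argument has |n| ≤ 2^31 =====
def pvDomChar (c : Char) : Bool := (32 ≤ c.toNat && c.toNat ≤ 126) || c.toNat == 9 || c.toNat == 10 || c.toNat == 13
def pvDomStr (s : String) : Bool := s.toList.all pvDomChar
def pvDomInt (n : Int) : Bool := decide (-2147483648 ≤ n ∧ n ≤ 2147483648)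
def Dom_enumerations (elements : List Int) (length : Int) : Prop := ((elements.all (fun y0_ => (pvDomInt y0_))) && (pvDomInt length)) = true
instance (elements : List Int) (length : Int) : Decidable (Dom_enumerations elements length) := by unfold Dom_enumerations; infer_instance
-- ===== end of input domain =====

-- ===== PORT A =====
-- B builds the product iteratively (accumulator of partial sequences) instead of A's
-- recursive backtracking over a shared buffer; return values proved equal for 0 ≤ length.
-- fuel makes A's unbounded recursion total; under Pre_ (0 ≤ length) fuel length.toNat + 1 never runs out
def generate_enums (elements : List Int) (length : Int) : Nat → List Int → List (List Int)
  | 0, _ => []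
  | fuel + 1, enum =>
    if (enum.length : Int) = length then [enum]
    else elements.flatMap (fun elm => generate_enums elements length fuel (enum ++ [elm]))

def enumerations (elements : List Int) (length : Int) : List (List Int) :=
  generate_enums elements length (length.toNat + 1) []

-- ===== PORT B =====
def enumerations_alt (elements : List Int) (length : Int) : List (List Int) :=
  (PySem.List.pyRange 0 length 1).foldl
    (fun result _ => result.flatMap (fun prefixL => elements.map (fun e => prefixL ++ [e])))
    [[]]

-- ===== PRECONDITION & SPEC =====
-- Pre_ excludes length < 0: there A either recurses forever (non-empty elements, RecursionError)
-- or returns the accidental [] for empty elements, a degenerate corner outside the natural domain.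
def Pre_enumerations (elements : List Int) (length : Int) : Prop := 0 ≤ length
instance (elements : List Int) (length : Int) : Decidable (Pre_enumerations elements length) := by unfold Pre_enumerations; infer_instance
def pvWitness_enumerations : List Int × Int := ([1, 2], 2)

def Spec_enumerations (elements : List Int) (length : Int) (out : List (List Int)) : Prop := out = enumerations_alt elements length
instance (elements : List Int) (length : Int) (out : List (List Int)) : Decidable (Spec_enumerations elements length out) := by unfold Spec_enumerations; infer_instance

-- ===== CLAIM (what is proved, stated in full; the proofs are below) =====
def Claim_equal_enumerations : Prop := ∀ (elements : List Int) (length : Int), Dom_enumerations elements length → Pre_enumerations elements length → Spec_enumerations elements length (enumerations elements length)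

-- ===== LEMMAS AND PROOFS =====
-- abstract form of A's recursion once fuel suffices: k positions left to fill
def prodA (elements : List Int) : Nat → List Int → List (List Int)
  | 0, enum => [enum]
  | k + 1, enum => elements.flatMap (fun elm => prodA elements k (enum ++ [elm]))

def stepB (elements : List Int) (result : List (List Int)) : List (List Int) :=
  result.flatMap (fun p => elements.map (fun e => p ++ [e]))

theorem genA_eq_prodA (elements : List Int) (length : Int) :
    ∀ (k fuel : Nat) (enum : List Int), (enum.length : Int) + k = length → k < fuel →
      generate_enums elements length fuel enum = prodA elements k enum := by
  intro k
  induction k with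
  | zero =>
    intro fuel enum h hf
    cases fuel with
    | zero => omega
    | succ f =>
      simp only [generate_enums, prodA]
      rw [if_pos (by omega)]
  | succ k ih =>
    intro fuel enum h hf
    cases fuel with
    | zero => omega
    | succ f =>
      simp only [generate_enums, prodA]
      rw [if_neg (by omega)]
      refine List.flatMap_congr ?_
      intro elm _
      exact ih f (enum ++ [elm]) (by simp; omega) (by omega)

theorem stepB_flatMap {α : Type} (elements : List Int) (l : List α) (f : α → List (List Int)) :
    stepB elements (l.flatMap f) = l.flatMap (fun x => stepB elements (f x)) := by
  simp [stepB, List.flatMap_assoc]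

theorem prodA_succ_step (elements : List Int) :
    ∀ (k : Nat) (enum : List Int), prodA elements (k + 1) enum = stepB elements (prodA elements k enum) := by
  intro k
  induction k with
  | zero =>
    intro enum
    simp only [prodA, stepB]
    induction elements with
    | nil => rfl
    | cons a t iht => simp_all [List.flatMap_cons]
  | succ k ih =>
    intro enum
    have : prodA elements (k + 1 + 1) enum
        = elements.flatMap (fun elm => prodA elements (k + 1) (enum ++ [elm])) := rfl
    rw [this]
    conv_rhs => rw [show prodA elements (k + 1) enum
        = elements.flatMap (fun elm => prodA elements k (enum ++ [elm])) from rfl]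
    rw [stepB_flatMap]
    exact List.flatMap_congr (fun elm _ => ih (enum ++ [elm]))

theorem prodA_eq_iterate (elements : List Int) (k : Nat) :
    prodA elements k [] = (stepB elements)^[k] [[]] := by
  induction k with
  | zero => rfl
  | succ k ih =>
    rw [prodA_succ_step, ih, Function.iterate_succ_apply']

theorem foldl_const_iterate {α β : Type} (g : β → β) (init : β) :
    ∀ (l : List α), l.foldl (fun r _ => g r) init = g^[l.length] init := by
  intro l
  induction l generalizing init with
  | nil => rfl
  | cons x xs ih =>
    simp [List.foldl_cons, ih, Function.iterate_succ_apply]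

-- ===== VERDICT (by name: the statement is the Claim_ definition above) =====
theorem enumerations_spec : Claim_equal_enumerations := by
  intro elements length _ hpre
  unfold Pre_enumerations at hpre
  unfold Spec_enumerations enumerations enumerations_alt
  rw [genA_eq_prodA elements length length.toNat (length.toNat + 1) []
      (by simp; omega) (by omega)]
  rw [prodA_eq_iterate]
  rw [show (PySem.List.pyRange 0 length 1).foldl
        (fun result _ => result.flatMap (fun prefixL => elements.map (fun e => prefixL ++ [e]))) [[]]
      = (stepB elements)^[(PySem.List.pyRange 0 length 1).length] [[]]
    from foldl_const_iterate (stepB elements) [[]] _]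
  rw [PySem.List.length_pyRange_one]
  norm_num
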